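-- pv_equiv track=rewrite | github.com/evaapinaa/Python | Sílaba tónica/main.py | buscarVocalTonica
-- ===== SOURCE A (Python) =====
-- def buscarVocalTonica(silaba):
--     # Si una palabra sin tilde termina con una consonante distinta de 's' o 'n', la última sílaba
--     # es la tónica. Por ejemplo: ababol
--     # En los diptongos la vocal tónica es la abierta o la segunda cerrada.
--     # En los triptongos la vocal tónica es la central.
--     vocales_abiertas = "aeo"
--     vocales_cerradas = "iu"
--
--     for i in range(len(silaba)):
--         # Si encontramos una vocal abierta en la sílaba
--         if silaba[i] in vocales_abiertas:
--             # Reemplazamos la vocal con su versión en mayúscula en la misma posición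
--             return silaba[:i] + silaba[i].upper() + silaba[i+1:]
--         # Si encontramos una vocal cerrada en la sílaba
--         elif silaba[i] in vocales_cerradas:
--             # Reemplazamos la vocal con su versión en mayúscula en la misma posición
--             return silaba[:i] + silaba[i].upper() + silaba[i+1:]
--
--     # Si no se encuentra ninguna vocal abierta o cerrada, se considera la última vocal como tónica
--     return silaba[:-1] + silaba[-1].upper()
-- ===== SOURCE B (Python) =====
-- def buscarVocalTonica(silaba):
--     # Five whole-string scans (str.find per vowel) aggregated with min,
--     # instead of A's single early-exit index loop.
--     positions = [silaba.find(v) for v in "aeiou"]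
--     valid = [p for p in positions if p >= 0]
--     idx = min(valid) if valid else len(silaba) - 1
--     return silaba[:idx] + silaba[idx].upper() + silaba[idx+1:]
-- ===== Notes on version B (the rewrite author's own statement) =====
-- stated objective: alternative
-- what changed: Replaces A's single early-exit per-character index loop by five whole-string str.find scans (one per vowel) whose non-negative results are aggregated with min to locate the first vowel, falling back to len-1 when no vowel exists.
import Mathlib
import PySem

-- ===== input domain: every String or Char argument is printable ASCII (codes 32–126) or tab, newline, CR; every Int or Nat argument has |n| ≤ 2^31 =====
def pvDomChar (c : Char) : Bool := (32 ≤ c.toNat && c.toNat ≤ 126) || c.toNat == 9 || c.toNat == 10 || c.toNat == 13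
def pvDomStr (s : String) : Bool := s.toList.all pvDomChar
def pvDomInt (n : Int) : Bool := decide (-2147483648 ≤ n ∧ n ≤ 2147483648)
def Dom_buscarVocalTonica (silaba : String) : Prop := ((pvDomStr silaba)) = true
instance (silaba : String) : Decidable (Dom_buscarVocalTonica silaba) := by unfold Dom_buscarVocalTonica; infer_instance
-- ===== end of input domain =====

-- B replaces A's single early-exit index scan by five whole-string `str.find` scans
-- (one per vowel) aggregated with `min`; objective: alternative decomposition, same result.

-- ===== PORT A =====
-- A's `for i in range(len(silaba))` loop with early return; `silaba[i] in "aeo"` is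
-- single-character membership; slices silaba[:i]/silaba[i+1:] with 0 ≤ i are take/drop
-- (exact); silaba[:-1] is dropLast and silaba[-1] is getLast? (none = IndexError,
-- excluded by Pre_).
def buscarVocalTonicaLoop (s : List Char) (i : Nat) : List Char :=
  if h : i < s.length then
    let c := s[i]
    if c = 'a' ∨ c = 'e' ∨ c = 'o' then
      s.take i ++ [PySem.Chars.upperChar c] ++ s.drop (i + 1)
    else if c = 'i' ∨ c = 'u' then
      s.take i ++ [PySem.Chars.upperChar c] ++ s.drop (i + 1)
    else
      buscarVocalTonicaLoop s (i + 1)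
  else
    match s.getLast? with
    | some c => s.dropLast ++ [PySem.Chars.upperChar c]
    | none => []   -- Python raises IndexError here (empty string); excluded by Pre_
termination_by s.length - i

def buscarVocalTonica (silaba : String) : String :=
  String.mk (buscarVocalTonicaLoop silaba.toList 0)

-- ===== PORT B =====
-- Source B: positions = [silaba.find(v) for v in "aeiou"]; valid = the non-negative ones;
-- idx = min(valid) if valid else len(silaba) - 1; then splice the uppercased character.
-- silaba[idx] is pyGet? (none = IndexError on the empty string, excluded by Pre_).
def buscarVocalTonica_alt (silaba : String) : String :=
  let s := silaba.toList
  let positions := ['a', 'e', 'i', 'o', 'u'].map (fun v => PySem.Chars.find s [v])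
  let valid := positions.filter (fun p => decide (0 ≤ p))
  let idx : Int := PySem.List.minD valid (fun p => p) ((s.length : Int) - 1)
  String.mk (PySem.Chars.slice s none (some idx)
    ++ (match PySem.Chars.pyGet? s idx with
        | some c => [PySem.Chars.upperChar c]
        | none => [])   -- Python raises IndexError here; excluded by Pre_
    ++ PySem.Chars.slice s (some (idx + 1)) none)

-- ===== PRECONDITION & SPEC =====
-- Pre_ excludes exactly the empty string, on which A (and B) raises IndexError
-- (silaba[-1] after the vowel-free loop / silaba[idx]).
def Pre_buscarVocalTonica (silaba : String) : Prop := silaba ≠ ""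
instance (silaba : String) : Decidable (Pre_buscarVocalTonica silaba) := by
  unfold Pre_buscarVocalTonica; infer_instance

def pvWitness_buscarVocalTonica : String := "tron"

def Spec_buscarVocalTonica (silaba : String) (out : String) : Prop := out = buscarVocalTonica_alt silaba
instance (silaba : String) (out : String) : Decidable (Spec_buscarVocalTonica silaba out) := by
  unfold Spec_buscarVocalTonica; infer_instance

-- ===== CLAIM (what is proved, stated in full; the proofs are below) =====
def Claim_equal_buscarVocalTonica : Prop := ∀ (silaba : String), Dom_buscarVocalTonica silaba → Pre_buscarVocalTonica silaba → Spec_buscarVocalTonica silaba (buscarVocalTonica silaba)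

-- ===== LEMMAS AND PROOFS =====

def isVowel (c : Char) : Bool := c = 'a' || c = 'e' || c = 'i' || c = 'o' || c = 'u'

lemma singleton_prefix_drop (l : List Char) (v : Char) (j : Nat) :
    [v] <+: l.drop j ↔ l[j]? = some v := by
  rw [← List.head?_drop]
  cases hd : l.drop j with
  | nil => simp [List.prefix_iff_eq_take]
  | cons a t => simp [List.cons_prefix_cons, eq_comm]

-- str.find for a single character: non-negative iff present, and then it points at the
-- first occurrence.
lemma find_char_mem (s : List Char) (v : Char) (h : v ∈ s) :
    0 ≤ PySem.Chars.find s [v] ∧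
    s[(PySem.Chars.find s [v]).toNat]? = some v ∧
    ∀ j < (PySem.Chars.find s [v]).toNat, s[j]? ≠ some v := by
  have h0 : 0 ≤ PySem.Chars.find s [v] :=
    (PySem.Chars.find_nonneg_iff s [v]).2 ((List.singleton_infix_iff v s).2 h)
  obtain ⟨h1, h2⟩ := PySem.Chars.find_spec h0
  refine ⟨h0, (singleton_prefix_drop s v _).1 h1, fun j hj hcontra => ?_⟩
  exact h2 j hj ((singleton_prefix_drop s v j).2 hcontra)

lemma find_char_not_mem (s : List Char) (v : Char) (h : v ∉ s) :
    PySem.Chars.find s [v] = -1 :=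
  (PySem.Chars.find_eq_neg_one_iff s [v]).2 (fun hinf => h ((List.singleton_infix_iff v s).1 hinf))

-- B's idx is the index of the first vowel when one exists.
lemma minD_valid_eq_findIdx (s : List Char) (hn : s.findIdx isVowel < s.length) :
    PySem.List.minD
      ((['a', 'e', 'i', 'o', 'u'].map (fun v => PySem.Chars.find s [v])).filter
        (fun p => decide (0 ≤ p)))
      (fun p => p) ((s.length : Int) - 1) = (s.findIdx isVowel : Int) := by
  set n := s.findIdx isVowel with hndef
  set valid := ((['a', 'e', 'i', 'o', 'u'].map (fun v => PySem.Chars.find s [v])).filter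
        (fun p => decide (0 ≤ p))) with hvalid
  have hvow : isVowel s[n] = true := List.findIdx_getElem (w := hn)
  -- the vowel at position n
  set v0 := s[n] with hv0
  have hv0mem : v0 ∈ s := List.getElem_mem hn
  obtain ⟨hf0, hfget, hffirst⟩ := find_char_mem s v0 hv0mem
  -- find s [v0] = n
  have hfind_v0 : PySem.Chars.find s [v0] = (n : Int) := by
    have hle : (PySem.Chars.find s [v0]).toNat ≤ n := by
      by_contra hgt
      exact hffirst n (by omega) (by simpa using (List.getElem?_eq_getElem hn).symm ▸ rfl)
    have hge : n ≤ (PySem.Chars.find s [v0]).toNat := by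
      by_contra hlt
      push_neg at hlt
      have hlen : (PySem.Chars.find s [v0]).toNat < s.length := by omega
      have : isVowel s[(PySem.Chars.find s [v0]).toNat] = false :=
        List.not_of_lt_findIdx (by omega)
      have hget : s[(PySem.Chars.find s [v0]).toNat] = v0 := by
        have := hfget
        rwa [List.getElem?_eq_getElem hlen, Option.some_inj] at this
      rw [hget] at this
      rw [this] at hvow
      exact Bool.false_ne_true hvow
    omega
  -- n is in valid
  have hv0V : v0 ∈ ['a', 'e', 'i', 'o', 'u'] := by
    simp only [isVowel, Bool.or_eq_true, decide_eq_true_eq] at hvow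
    simp only [List.mem_cons, List.not_mem_nil, or_false]
    tauto
  have hnmem : (n : Int) ∈ valid := by
    rw [hvalid, List.mem_filter]
    exact ⟨List.mem_map.2 ⟨v0, hv0V, hfind_v0⟩, by simp⟩
  -- every member of valid is ≥ n
  have hlb : ∀ p ∈ valid, (n : Int) ≤ p := by
    intro p hp
    rw [hvalid, List.mem_filter] at hp
    obtain ⟨hpmem, hp0⟩ := hp
    obtain ⟨v, hvV, hveq⟩ := List.mem_map.1 hpmem
    subst hveq
    have hp0' : (0 : Int) ≤ PySem.Chars.find s [v] := by simpa using hp0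
    have hvs : v ∈ s := by
      by_contra habs
      rw [find_char_not_mem s v habs] at hp0'
      omega
    obtain ⟨_, hget, _⟩ := find_char_mem s v hvs
    -- position of v is ≥ n since it carries a vowel
    by_contra hlt
    push_neg at hlt
    have hlen : (PySem.Chars.find s [v]).toNat < s.length := by
      rcases List.getElem?_eq_some_iff.1 hget with ⟨hl, _⟩
      exact hl
    have hfalse : isVowel s[(PySem.Chars.find s [v]).toNat] = false :=
      List.not_of_lt_findIdx (by omega)
    have hgetv : s[(PySem.Chars.find s [v]).toNat] = v := by
      rwa [List.getElem?_eq_getElem hlen, Option.some_inj] at hget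
    rw [hgetv] at hfalse
    have : isVowel v = true := by
      simp only [List.mem_cons, List.not_mem_nil, or_false] at hvV
      simp only [isVowel, Bool.or_eq_true, decide_eq_true_eq]
      tauto
    rw [hfalse] at this
    exact Bool.false_ne_true this
  -- conclude minD = n
  cases hmin : PySem.List.min? valid (fun p => p) with
  | none => rw [PySem.List.min?_eq_none_iff] at hmin; rw [hmin] at hnmem; cases hnmem
  | some m =>
    have hmmem := PySem.List.min?_mem hmin
    have hmle : m ≤ (n : Int) := PySem.List.min?_isMin hmin _ hnmem
    have hnle : (n : Int) ≤ m := hlb m hmmem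
    have : m = (n : Int) := le_antisymm hmle hnle
    show (PySem.List.min? valid (fun p => p)).getD _ = _
    rw [hmin, this, Option.getD_some]

lemma valid_nil_of_no_vowel (s : List Char) (hn : s.findIdx isVowel = s.length) :
    ((['a', 'e', 'i', 'o', 'u'].map (fun v => PySem.Chars.find s [v])).filter
      (fun p => decide (0 ≤ p))) = [] := by
  have hno : ∀ c ∈ s, isVowel c = false := List.findIdx_eq_length.1 hn
  have habs : ∀ v ∈ (['a', 'e', 'i', 'o', 'u'] : List Char), v ∉ s := by
    intro v hvV hvs
    have hfalse := hno v hvs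
    have htrue : isVowel v = true := by
      simp only [List.mem_cons, List.not_mem_nil, or_false] at hvV
      simp only [isVowel, Bool.or_eq_true, decide_eq_true_eq]
      tauto
    rw [hfalse] at htrue
    exact Bool.false_ne_true htrue
  rw [List.filter_eq_nil_iff]
  intro p hp
  obtain ⟨v, hvV, hveq⟩ := List.mem_map.1 hp
  rw [find_char_not_mem s v (habs v hvV)] at hveq
  simp [← hveq]

-- the common value both ports compute, expressed through n = findIdx
def canon (s : List Char) : List Char :=
  let n := s.findIdx isVowel
  if h : n < s.length then
    s.take n ++ [PySem.Chars.upperChar s[n]] ++ s.drop (n + 1)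
  else
    match s.getLast? with
    | some c => s.dropLast ++ [PySem.Chars.upperChar c]
    | none => []

lemma loopA_eq_canon (s : List Char) : ∀ (k i : Nat), s.length - i ≤ k → i ≤ s.length →
    (∀ j (hj : j < s.length), j < i → isVowel s[j] = false) →
    buscarVocalTonicaLoop s i = canon s := by
  intro k
  induction k with
  | zero =>
    intro i hk hi hno
    have hieq : i = s.length := by omega
    subst hieq
    rw [buscarVocalTonicaLoop]
    rw [dif_neg (by omega)]
    have hfi : s.findIdx isVowel = s.length := by
      rw [List.findIdx_eq_length]
      intro c hc
      obtain ⟨j, hj, rfl⟩ := List.mem_iff_getElem.1 hc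
      exact hno j hj hj
    unfold canon
    rw [hfi, dif_neg (by omega)]
  | succ k ih =>
    intro i hk hi hno
    by_cases h : i < s.length
    · rw [buscarVocalTonicaLoop]
      rw [dif_pos h]
      by_cases hv : isVowel s[i] = true
      · have hfi : s.findIdx isVowel = i := by
          have h1 : ¬ s.findIdx isVowel < i := by
            intro hlt
            have hlen : s.findIdx isVowel < s.length := by omega
            have := hno _ hlen hlt
            rw [List.findIdx_getElem (w := hlen)] at this
            exact absurd this (by decide)
          have h2 : ¬ i < s.findIdx isVowel := by
            intro hlt
            have hfalse : isVowel s[i] = false := List.not_of_lt_findIdx hlt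
            rw [hfalse] at hv
            exact Bool.false_ne_true hv
          omega
        have hcond : (s[i] = 'a' ∨ s[i] = 'e' ∨ s[i] = 'o') ∨ (s[i] = 'i' ∨ s[i] = 'u') := by
          simp only [isVowel, Bool.or_eq_true, decide_eq_true_eq] at hv
          tauto
        have hres : (if s[i] = 'a' ∨ s[i] = 'e' ∨ s[i] = 'o' then
              s.take i ++ [PySem.Chars.upperChar s[i]] ++ s.drop (i + 1)
            else if s[i] = 'i' ∨ s[i] = 'u' then
              s.take i ++ [PySem.Chars.upperChar s[i]] ++ s.drop (i + 1)
            else buscarVocalTonicaLoop s (i + 1)) =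
            s.take i ++ [PySem.Chars.upperChar s[i]] ++ s.drop (i + 1) := by
          rcases hcond with h1 | h2
          · rw [if_pos h1]
          · by_cases h1 : s[i] = 'a' ∨ s[i] = 'e' ∨ s[i] = 'o'
            · rw [if_pos h1]
            · rw [if_neg h1, if_pos h2]
        rw [hres]
        unfold canon
        rw [hfi, dif_pos (hfi ▸ h)]
      · have hvfalse : isVowel s[i] = false := by
          cases hb : isVowel s[i]
          · rfl
          · exact absurd hb hv
        have hnot1 : ¬ (s[i] = 'a' ∨ s[i] = 'e' ∨ s[i] = 'o') := by
          intro hcontra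
          have : isVowel s[i] = true := by
            simp only [isVowel, Bool.or_eq_true, decide_eq_true_eq]
            tauto
          rw [hvfalse] at this
          exact Bool.false_ne_true this
        have hnot2 : ¬ (s[i] = 'i' ∨ s[i] = 'u') := by
          intro hcontra
          have : isVowel s[i] = true := by
            simp only [isVowel, Bool.or_eq_true, decide_eq_true_eq]
            tauto
          rw [hvfalse] at this
          exact Bool.false_ne_true this
        rw [if_neg hnot1, if_neg hnot2]
        refine ih (i + 1) (by omega) (by omega) ?_
        intro j hj hji
        by_cases hji' : j < i
        · exact hno j hj hji'
        · have : j = i := by omega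
          subst this
          exact hvfalse
    · have hieq : i = s.length := by omega
      subst hieq
      rw [buscarVocalTonicaLoop]
      rw [dif_neg (by omega)]
      have hfi : s.findIdx isVowel = s.length := by
        rw [List.findIdx_eq_length]
        intro c hc
        obtain ⟨j, hj, rfl⟩ := List.mem_iff_getElem.1 hc
        exact hno j hj hj
      unfold canon
      rw [hfi, dif_neg (by omega)]

-- B's body (after zeta-reducing the lets), list-level.
lemma alt_unfold (silaba : String) :
    buscarVocalTonica_alt silaba = String.mk
      (PySem.Chars.slice silaba.toList none (some (PySem.List.minD
          ((['a', 'e', 'i', 'o', 'u'].map (fun v => PySem.Chars.find silaba.toList [v])).filter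
            (fun p => decide (0 ≤ p))) (fun p => p) ((silaba.toList.length : Int) - 1)))
        ++ (match PySem.Chars.pyGet? silaba.toList (PySem.List.minD
          ((['a', 'e', 'i', 'o', 'u'].map (fun v => PySem.Chars.find silaba.toList [v])).filter
            (fun p => decide (0 ≤ p))) (fun p => p) ((silaba.toList.length : Int) - 1)) with
            | some c => [PySem.Chars.upperChar c]
            | none => [])
        ++ PySem.Chars.slice silaba.toList (some ((PySem.List.minD
          ((['a', 'e', 'i', 'o', 'u'].map (fun v => PySem.Chars.find silaba.toList [v])).filter
            (fun p => decide (0 ≤ p))) (fun p => p) ((silaba.toList.length : Int) - 1)) + 1)) none) := rfl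

lemma alt_eq_canon (s : List Char) :
    PySem.Chars.slice s none (some (PySem.List.minD
        ((['a', 'e', 'i', 'o', 'u'].map (fun v => PySem.Chars.find s [v])).filter
          (fun p => decide (0 ≤ p))) (fun p => p) ((s.length : Int) - 1)))
      ++ (match PySem.Chars.pyGet? s (PySem.List.minD
        ((['a', 'e', 'i', 'o', 'u'].map (fun v => PySem.Chars.find s [v])).filter
          (fun p => decide (0 ≤ p))) (fun p => p) ((s.length : Int) - 1)) with
          | some c => [PySem.Chars.upperChar c]
          | none => [])
      ++ PySem.Chars.slice s (some ((PySem.List.minD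
        ((['a', 'e', 'i', 'o', 'u'].map (fun v => PySem.Chars.find s [v])).filter
          (fun p => decide (0 ≤ p))) (fun p => p) ((s.length : Int) - 1)) + 1)) none
    = canon s := by
  have hle := List.findIdx_le_length (p := isVowel) (xs := s)
  by_cases h : s.findIdx isVowel < s.length
  · rw [minD_valid_eq_findIdx s h]
    rw [PySem.Chars.slice_eq_listSlice, PySem.Chars.slice_eq_listSlice,
        PySem.Chars.pyGet?_eq_listPyGet?]
    rw [PySem.List.slice_to s (by positivity), PySem.List.pyGet?_natCast]
    have hcast1 : ((s.findIdx isVowel : Int)).toNat = s.findIdx isVowel := Int.toNat_natCast _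
    have hcast2 : ((s.findIdx isVowel : Int) + 1) = ((s.findIdx isVowel + 1 : Nat) : Int) := by
      push_cast; ring
    rw [hcast1, hcast2, PySem.List.slice_from s (by positivity), Int.toNat_natCast]
    rw [List.getElem?_eq_getElem h]
    unfold canon
    rw [dif_pos h]
  · have hn : s.findIdx isVowel = s.length := by omega
    rw [valid_nil_of_no_vowel s hn]
    have hminD : PySem.List.minD ([] : List Int) (fun p => p) ((s.length : Int) - 1)
        = (s.length : Int) - 1 := rfl
    rw [hminD]
    cases s with
    | nil =>
      unfold canon
      rfl
    | cons a t =>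
      have hlen : ((a :: t).length : Int) - 1 = (((a :: t).length - 1 : Nat) : Int) := by
        simp only [List.length_cons]
        push_cast
        ring
      rw [PySem.Chars.slice_eq_listSlice, PySem.Chars.slice_eq_listSlice,
          PySem.Chars.pyGet?_eq_listPyGet?, hlen]
      rw [PySem.List.slice_to _ (by positivity), PySem.List.pyGet?_natCast, Int.toNat_natCast]
      have hcast2 : (((((a :: t).length - 1 : Nat)) : Int) + 1) = (((a :: t).length : Nat) : Int) := by
        have : 1 ≤ (a :: t).length := by simp
        push_cast [this]
        ring
      rw [hcast2, PySem.List.slice_from _ (by positivity), Int.toNat_natCast]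
      rw [← List.dropLast_eq_take, List.drop_length, ← List.getLast?_eq_getElem?]
      cases hlast : (a :: t).getLast? with
      | none => rw [List.getLast?_eq_none_iff] at hlast; cases hlast
      | some c =>
        unfold canon
        rw [dif_neg (by omega)]
        rw [hlast]
        simp

-- ===== VERDICT (by name: the statement is the Claim_ definition above) =====
theorem buscarVocalTonica_spec : Claim_equal_buscarVocalTonica := by
  intro silaba _ _
  show buscarVocalTonica silaba = buscarVocalTonica_alt silaba
  rw [alt_unfold, buscarVocalTonica]
  rw [loopA_eq_canon silaba.toList silaba.toList.length 0 (by omega) (by omega)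
      (fun j hj hj0 => absurd hj0 (by omega))]
  rw [alt_eq_canon]
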